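-- pv_equiv track=rewrite | github.com/zazabap/problem-reductions | docs/paper/verify-reductions/adversary_k_coloring_partition_into_cliques.py | is_feasible_target
-- ===== SOURCE A (Python) =====
-- def is_feasible_target(num_vertices, edges, num_cliques, config):
--     """Check if config is a valid partition into <= num_cliques cliques."""
--     if len(config) != num_vertices:
--         return False
--     for c in config:
--         if c < 0 or c >= num_cliques:
--             return False
--     adj = set()
--     for u, v in edges:
--         adj.add((min(u, v), max(u, v)))
--     for g in range(num_cliques):
--         members = [v for v in range(num_vertices) if config[v] == g]
--         for i in range(len(members)):
--             for j in range(i + 1, len(members)):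
--                 a, b = min(members[i], members[j]), max(members[i], members[j])
--                 if (a, b) not in adj:
--                     return False
--     return True
-- ===== SOURCE B (Python) =====
-- def is_feasible_target(num_vertices, edges, num_cliques, config):
--     """Check if config is a valid partition into <= num_cliques cliques.
--
--     Counting strategy (no pair enumeration): collect the distinct normalized
--     intra-group edges in one pass over the edge list, and compare their number
--     with the total number of same-group vertex pairs, the sum of C(size, 2)
--     over the group sizes.  Every group is a clique exactly when they agree."""
--     if len(config) != num_vertices:
--         return False
--     for c in config:
--         if c < 0 or c >= num_cliques:
--             return False
--     intra = set()
--     for u, v in edges: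
--         a, b = (u, v) if u <= v else (v, u)
--         if a != b and 0 <= a and b < num_vertices and config[a] == config[b]:
--             intra.add((a, b))
--     counts = {}
--     for c in config:
--         counts[c] = counts.get(c, 0) + 1
--     need = 0
--     for s in counts.values():
--         need += s * (s - 1) // 2
--     return len(intra) == need
-- ===== Notes on version B (the rewrite author's own statement) =====
-- stated objective: alternative
-- what changed: Instead of enumerating every vertex pair inside every colour class and probing the edge set, B counts the distinct normalized intra-group edges in one pass over the edge list and compares that count with the sum of C(size,2) over the group sizes obtained from a counting dict.
import Mathlib
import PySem

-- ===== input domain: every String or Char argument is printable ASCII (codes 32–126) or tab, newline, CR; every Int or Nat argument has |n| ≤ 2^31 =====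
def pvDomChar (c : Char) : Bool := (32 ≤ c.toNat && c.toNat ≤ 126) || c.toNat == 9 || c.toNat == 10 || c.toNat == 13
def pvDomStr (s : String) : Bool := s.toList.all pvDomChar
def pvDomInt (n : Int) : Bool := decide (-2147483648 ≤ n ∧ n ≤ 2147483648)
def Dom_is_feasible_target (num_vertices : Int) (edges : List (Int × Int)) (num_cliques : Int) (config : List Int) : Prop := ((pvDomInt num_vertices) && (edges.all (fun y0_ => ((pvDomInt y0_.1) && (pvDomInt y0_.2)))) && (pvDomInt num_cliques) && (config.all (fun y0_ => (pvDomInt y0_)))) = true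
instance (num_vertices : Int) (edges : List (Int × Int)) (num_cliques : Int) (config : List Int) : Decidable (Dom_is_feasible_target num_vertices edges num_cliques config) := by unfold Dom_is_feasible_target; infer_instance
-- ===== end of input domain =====

-- B replaces A's per-group all-pairs membership test by an edge/pair counting argument
-- (distinct intra-group edges vs sum of C(size,2)) — a different algorithm of similar cost.
-- ===== PORT A =====
def is_feasible_target (num_vertices : Int) (edges : List (Int × Int)) (num_cliques : Int) (config : List Int) : Bool :=
  if (config.length : Int) ≠ num_vertices then false
  else if config.any (fun c => decide (c < 0) || decide (num_cliques ≤ c)) then false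
  else
    -- adj = set of normalized edges
    let adj : PySem.Set (Int × Int) :=
      edges.foldl (fun s e => PySem.Set.add s (min e.1 e.2, max e.1 e.2)) PySem.Set.empty
    -- for g in range(num_cliques): … (a loop whose only early exit returns False = all)
    (PySem.List.pyRange 0 num_cliques 1).all (fun g =>
      -- config[v] is always in range here (len(config) = num_vertices), so pyGetD is exact
      let members := (PySem.List.pyRange 0 num_vertices 1).filter
        (fun v => PySem.List.pyGetD config v 0 == g)
      (List.range members.length).all (fun i =>
        (List.range' (i + 1) (members.length - (i + 1))).all (fun j =>
          let a := min (members.getD i 0) (members.getD j 0)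
          let b := max (members.getD i 0) (members.getD j 0)
          PySem.Set.contains adj (a, b))))

-- ===== PORT B =====
def is_feasible_target_alt (num_vertices : Int) (edges : List (Int × Int)) (num_cliques : Int) (config : List Int) : Bool :=
  if (config.length : Int) ≠ num_vertices then false
  else if config.any (fun c => decide (c < 0) || decide (num_cliques ≤ c)) then false
  else
    -- intra = set of distinct normalized same-group edges
    let intra : PySem.Set (Int × Int) :=
      edges.foldl (fun s e =>
        let a := if e.1 ≤ e.2 then e.1 else e.2
        let b := if e.1 ≤ e.2 then e.2 else e.1
        if a ≠ b ∧ 0 ≤ a ∧ b < num_vertices ∧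
            PySem.List.pyGetD config a 0 = PySem.List.pyGetD config b 0 then
          PySem.Set.add s (a, b)
        else s) PySem.Set.empty
    -- counts[c] = counts.get(c, 0) + 1
    let counts : PySem.Dict Int Int :=
      config.foldl (fun d c => d.insert c (d.getD c 0 + 1)) PySem.Dict.empty
    -- need = sum of s*(s-1)//2 over the group sizes
    let need : Int :=
      counts.values.foldl (fun acc s => acc + PySem.Int.floordiv (s * (s - 1)) 2) 0
    decide ((PySem.Set.len intra : Int) = need)

-- ===== PRECONDITION & SPEC =====
def Spec_is_feasible_target (num_vertices : Int) (edges : List (Int × Int)) (num_cliques : Int) (config : List Int) (out : Bool) : Prop := out = is_feasible_target_alt num_vertices edges num_cliques config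
instance (num_vertices : Int) (edges : List (Int × Int)) (num_cliques : Int) (config : List Int) (out : Bool) : Decidable (Spec_is_feasible_target num_vertices edges num_cliques config out) := by unfold Spec_is_feasible_target; infer_instance

-- ===== CLAIM (what is proved, stated in full; the proofs are below) =====
def Claim_equal_is_feasible_target : Prop := ∀ (num_vertices : Int) (edges : List (Int × Int)) (num_cliques : Int) (config : List Int), Dom_is_feasible_target num_vertices edges num_cliques config → Spec_is_feasible_target num_vertices edges num_cliques config (is_feasible_target num_vertices edges num_cliques config)

-- ===== LEMMAS AND PROOFS =====

-- `config[i]` as a total function on Nat indices (always used with i < config.length)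
def pvCfg (config : List Int) (i : Nat) : Int := config.getD i 0

-- A's normalized edge list
def pvAdjL (edges : List (Int × Int)) : List (Int × Int) :=
  edges.map (fun e => (min e.1 e.2, max e.1 e.2))

-- the common semantic core: every same-group pair of vertices is an edge
def pvGood (edges : List (Int × Int)) (config : List Int) : Prop :=
  ∀ a b : Nat, a < b → b < config.length → pvCfg config a = pvCfg config b →
    ((a : Int), (b : Int)) ∈ pvAdjL edges

-- B's list of normalized intra-group edges (before dedup)
def pvGoodL (num_vertices : Int) (edges : List (Int × Int)) (config : List Int) :
    List (Int × Int) :=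
  edges.filterMap (fun e =>
    let a := if e.1 ≤ e.2 then e.1 else e.2
    let b := if e.1 ≤ e.2 then e.2 else e.1
    if a ≠ b ∧ 0 ≤ a ∧ b < num_vertices ∧
        PySem.List.pyGetD config a 0 = PySem.List.pyGetD config b 0 then
      some (a, b)
    else none)

-- indices of group g, as a list (A's members list, in Nat form) and as a Finset
def pvMembersN (config : List Int) (g : Int) : List Nat :=
  (List.range config.length).filter (fun i => pvCfg config i == g)

def pvS (config : List Int) (v : Int) : Finset Nat :=
  (Finset.range config.length).filter (fun i => pvCfg config i == v)

-- all same-group index pairs (a, b) with a < b, and their image in Int pairs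
def pvP (config : List Int) : Finset (Nat × Nat) :=
  ((Finset.range config.length) ×ˢ (Finset.range config.length)).filter
    (fun p => p.1 < p.2 ∧ pvCfg config p.1 = pvCfg config p.2)

def pvQ (config : List Int) : Finset (Int × Int) :=
  (pvP config).image (fun p => ((p.1 : Int), (p.2 : Int)))

lemma pvContainsIff {α : Type} [BEq α] [LawfulBEq α] (s : PySem.Set α) (x : α) :
    PySem.Set.contains s x = true ↔ x ∈ s := by
  unfold PySem.Set.contains; exact List.contains_iff_mem

lemma pvCfgMem (config : List Int) (i : Nat) (h : i < config.length) :
    pvCfg config i ∈ config := by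
  unfold pvCfg
  rw [List.getD_eq_getElem _ _ h]
  exact List.getElem_mem h

lemma pvFloordivChoose (c : Nat) :
    PySem.Int.floordiv ((c : Int) * ((c : Int) - 1)) 2 = ((c.choose 2 : Nat) : Int) := by
  cases c with
  | zero => decide
  | succ m =>
    have h : ((m + 1 : Nat) : Int) * (((m + 1 : Nat) : Int) - 1) = (((m + 1) * m : Nat) : Int) := by
      push_cast; ring
    rw [h, show (2 : Int) = ((2 : Nat) : Int) from rfl, PySem.Int.floordiv_natCast]
    norm_cast
    rw [Nat.choose_two_right]
    simp

lemma pvMapGetDRange {α : Type} (l : List α) (d : α) :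
    (List.range l.length).map (fun i => l.getD i d) = l := by
  apply List.ext_getElem (by simp)
  intro i h1 h2
  simp only [List.getElem_map, List.getElem_range]
  rw [List.getD_eq_getElem _ _ h2]

lemma pvToFinsetOfList {α : Type} [BEq α] [LawfulBEq α] [DecidableEq α] (L : List α) :
    (PySem.Set.ofList L).toFinset = L.toFinset := by
  ext x; simp [PySem.Set.mem_ofList]

lemma pvLenOfList {α : Type} [BEq α] [LawfulBEq α] [DecidableEq α] (L : List α) :
    (PySem.Set.ofList L).length = L.toFinset.card := by
  rw [← pvToFinsetOfList L, List.toFinset_card_of_nodup (PySem.Set.nodup_ofList L)]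

lemma pvCardS (config : List Int) (v : Int) : (pvS config v).card = config.count v := by
  unfold pvS
  rw [← List.toFinset_range config.length, ← List.toFinset_filter,
    List.toFinset_card_of_nodup (List.nodup_range.filter _), ← List.countP_eq_length_filter]
  conv_rhs => rw [← pvMapGetDRange config 0]
  rw [List.count_eq_countP, List.countP_map]
  apply List.countP_congr
  intro i _
  rw [Bool.eq_iff_iff]
  simp only [Function.comp_apply, pvCfg, beq_iff_eq]
  tauto

lemma pvLtPairs (s : Finset Nat) :
    ((s ×ˢ s).filter (fun p => p.1 < p.2)).card = Nat.choose s.card 2 := by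
  have hcard : ((s ×ˢ s).filter (fun p => p.1 < p.2)).card
      = ((s ×ˢ s).filter (fun p => p.2 < p.1)).card := by
    apply Finset.card_nbij' (fun p => p.swap) (fun p => p.swap)
    · intro p hp
      simp only [Finset.coe_filter, Finset.mem_product, Set.mem_setOf_eq] at hp ⊢
      exact ⟨⟨hp.1.2, hp.1.1⟩, hp.2⟩
    · intro p hp
      simp only [Finset.coe_filter, Finset.mem_product, Set.mem_setOf_eq] at hp ⊢
      exact ⟨⟨hp.1.2, hp.1.1⟩, hp.2⟩
    · intro p _; rfl
    · intro p _; rfl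
  have hdisj : Disjoint ((s ×ˢ s).filter (fun p => p.1 < p.2))
      ((s ×ˢ s).filter (fun p => p.2 < p.1)) := by
    rw [Finset.disjoint_left]
    intro p hp hq
    simp only [Finset.mem_filter] at hp hq
    omega
  have hunion : ((s ×ˢ s).filter (fun p => p.1 < p.2)) ∪ ((s ×ˢ s).filter (fun p => p.2 < p.1))
      = s.offDiag := by
    ext p
    simp only [Finset.mem_union, Finset.mem_filter, Finset.mem_product, Finset.mem_offDiag]
    constructor
    · rintro (⟨⟨h1, h2⟩, h3⟩ | ⟨⟨h1, h2⟩, h3⟩) <;> exact ⟨h1, h2, by omega⟩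
    · rintro ⟨h1, h2, h3⟩
      rcases Nat.lt_or_gt_of_ne h3 with h | h
      · exact Or.inl ⟨⟨h1, h2⟩, h⟩
      · exact Or.inr ⟨⟨h1, h2⟩, h⟩
  have hu := Finset.card_union_of_disjoint hdisj
  rw [hunion, Finset.offDiag_card] at hu
  have hm : s.card * (s.card - 1) = s.card * s.card - s.card := Nat.mul_pred s.card s.card
  rw [Nat.choose_two_right]
  omega

lemma pvCardP (config : List Int) :
    (pvP config).card = ∑ v ∈ config.toFinset, (config.count v).choose 2 := by
  have hb : pvP config = config.toFinset.biUnion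
      (fun v => (pvS config v ×ˢ pvS config v).filter (fun p => p.1 < p.2)) := by
    ext p
    simp only [pvP, pvS, Finset.mem_biUnion, Finset.mem_filter, Finset.mem_product,
      Finset.mem_range, List.mem_toFinset, beq_iff_eq]
    constructor
    · rintro ⟨⟨h1, h2⟩, hlt, hcfg⟩
      exact ⟨pvCfg config p.1, pvCfgMem config p.1 h1, ⟨⟨h1, rfl⟩, ⟨h2, hcfg.symm⟩⟩, hlt⟩
    · rintro ⟨v, _, ⟨⟨h1, e1⟩, ⟨h2, e2⟩⟩, hlt⟩
      exact ⟨⟨h1, h2⟩, hlt, by rw [e1, e2]⟩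
  rw [hb, Finset.card_biUnion]
  · exact Finset.sum_congr rfl (fun v _ => by rw [pvLtPairs, pvCardS])
  · intro v _ w _ hvw
    unfold Function.onFun
    rw [Finset.disjoint_left]
    intro p hp hq
    simp only [Finset.mem_filter, Finset.mem_product, pvS, Finset.mem_range, beq_iff_eq] at hp hq
    exact hvw (by rw [← hp.1.1.2, hq.1.1.2])

lemma pvMembersPairwise (config : List Int) (g : Int) :
    (pvMembersN config g).Pairwise (· < ·) :=
  List.pairwise_lt_range.filter _

lemma pvMembersNMem (config : List Int) (g : Int) (a : Nat) :
    a ∈ pvMembersN config g ↔ a < config.length ∧ pvCfg config a = g := by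
  simp [pvMembersN, List.mem_filter]

lemma pvFoldIntra (num_vertices : Int) (edges : List (Int × Int)) (config : List Int)
    (s : PySem.Set (Int × Int)) :
    edges.foldl (fun s e =>
      let a := if e.1 ≤ e.2 then e.1 else e.2
      let b := if e.1 ≤ e.2 then e.2 else e.1
      if a ≠ b ∧ 0 ≤ a ∧ b < num_vertices ∧
          PySem.List.pyGetD config a 0 = PySem.List.pyGetD config b 0 then
        PySem.Set.add s (a, b)
      else s) s =
    (pvGoodL num_vertices edges config).foldl PySem.Set.add s := by
  induction edges generalizing s with
  | nil => rfl
  | cons e tl ih =>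
    simp only [List.foldl_cons, pvGoodL, List.filterMap_cons] at *
    split_ifs with h1 h2
    · dsimp only
      rw [List.foldl_cons]
      exact ih _
    · dsimp only
      exact ih _
    · dsimp only
      rw [List.foldl_cons]
      exact ih _
    · dsimp only
      exact ih _

lemma pvMemGoodL (edges : List (Int × Int)) (config : List Int) {a b : Nat}
    (hab : a < b) (hb : b < config.length) (hcfg : pvCfg config a = pvCfg config b) :
    ((a : Int), (b : Int)) ∈ pvGoodL (config.length : Int) edges config ↔
      ((a : Int), (b : Int)) ∈ pvAdjL edges := by
  unfold pvGoodL pvAdjL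
  simp only [List.mem_filterMap, List.mem_map]
  constructor
  · rintro ⟨e, he, hfe⟩
    refine ⟨e, he, ?_⟩
    rw [min_def, max_def]
    split_ifs at hfe ⊢ <;>
      first
        | exact Option.some.inj hfe
        | simp at hfe
  · rintro ⟨e, he, hme⟩
    refine ⟨e, he, ?_⟩
    rw [min_def, max_def, Prod.mk.injEq] at hme
    obtain ⟨hma, hmb⟩ := hme
    rw [hma, hmb, if_pos]
    refine ⟨?_, ?_, ?_, ?_⟩
    · exact_mod_cast Nat.ne_of_lt hab
    · exact Int.natCast_nonneg a
    · exact_mod_cast hb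
    · rw [PySem.List.pyGetD_natCast, PySem.List.pyGetD_natCast]
      exact hcfg

lemma pvGoodLSubQ (edges : List (Int × Int)) (config : List Int) :
    ∀ x ∈ pvGoodL (config.length : Int) edges config, x ∈ pvQ config := by
  intro x hx
  unfold pvGoodL at hx
  simp only [List.mem_filterMap] at hx
  obtain ⟨e, _, hfe⟩ := hx
  set A := if e.1 ≤ e.2 then e.1 else e.2 with hA
  set B := if e.1 ≤ e.2 then e.2 else e.1 with hB
  by_cases hc : A ≠ B ∧ 0 ≤ A ∧ B < (config.length : Int) ∧
      PySem.List.pyGetD config A 0 = PySem.List.pyGetD config B 0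
  · rw [if_pos hc] at hfe
    obtain ⟨hne, ha, hbn, hcfg⟩ := hc
    have hxab : x = (A, B) := (Option.some.inj hfe).symm
    have hle : A ≤ B := by rw [hA, hB]; split_ifs with h <;> omega
    have hab : A < B := lt_of_le_of_ne hle hne
    have hb0 : (0 : Int) ≤ B := le_trans ha hle
    refine Finset.mem_image.mpr ⟨(A.toNat, B.toNat), ?_, ?_⟩
    · simp only [pvP, Finset.mem_filter, Finset.mem_product, Finset.mem_range]
      refine ⟨⟨by omega, by omega⟩, by omega, ?_⟩
      rw [PySem.List.pyGetD_of_nonneg config 0 ha, PySem.List.pyGetD_of_nonneg config 0 hb0]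
        at hcfg
      exact hcfg
    · rw [hxab]
      simp [Int.toNat_of_nonneg ha, Int.toNat_of_nonneg hb0]
  · rw [if_neg hc] at hfe
    simp at hfe

lemma pvCardIffGood (edges : List (Int × Int)) (config : List Int) :
    ((pvGoodL (config.length : Int) edges config).toFinset.card = (pvP config).card ↔
      pvGood edges config) := by
  have hQP : (pvQ config).card = (pvP config).card := by
    apply Finset.card_image_of_injective
    intro p q h
    simp only [Prod.mk.injEq, Nat.cast_inj] at h
    exact Prod.ext h.1 h.2
  have hsub : (pvGoodL (config.length : Int) edges config).toFinset ⊆ pvQ config :=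
    fun x hx => pvGoodLSubQ edges config x (List.mem_toFinset.mp hx)
  constructor
  · intro hcard
    have hle := Finset.card_le_card hsub
    have heq : (pvGoodL (config.length : Int) edges config).toFinset = pvQ config :=
      Finset.eq_of_subset_of_card_le hsub (by omega)
    intro a b hab hb hcfg
    have hmem : ((a : Int), (b : Int)) ∈ pvQ config := by
      refine Finset.mem_image.mpr ⟨(a, b), ?_, rfl⟩
      simp only [pvP, Finset.mem_filter, Finset.mem_product, Finset.mem_range]
      exact ⟨⟨lt_trans hab hb, hb⟩, hab, hcfg⟩
    rw [← heq] at hmem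
    exact (pvMemGoodL edges config hab hb hcfg).mp (List.mem_toFinset.mp hmem)
  · intro hgood
    have hsup : pvQ config ⊆ (pvGoodL (config.length : Int) edges config).toFinset := by
      intro x hx
      obtain ⟨p, hp, rfl⟩ := Finset.mem_image.mp hx
      simp only [pvP, Finset.mem_filter, Finset.mem_product, Finset.mem_range] at hp
      exact List.mem_toFinset.mpr ((pvMemGoodL edges config hp.2.1 hp.1.2 hp.2.2).mpr
        (hgood p.1 p.2 hp.2.1 hp.1.2 hp.2.2))
    rw [Finset.Subset.antisymm hsub hsup, hQP]

lemma pvAnyFalse (num_cliques : Int) (config : List Int)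
    (hcol : ∀ c ∈ config, 0 ≤ c ∧ c < num_cliques) :
    config.any (fun c => decide (c < 0) || decide (num_cliques ≤ c)) = false := by
  rw [List.any_eq_false]
  intro c hc
  have := hcol c hc
  simp only [Bool.or_eq_true, decide_eq_true_eq, not_or]
  omega

lemma pvMembersEq (config : List Int) (g : Int) :
    (PySem.List.pyRange 0 (config.length : Int) 1).filter
        (fun v => PySem.List.pyGetD config v 0 == g) =
      (pvMembersN config g).map (fun i : Nat => (i : Int)) := by
  rw [PySem.List.pyRange_zero_natCast, List.filter_map]
  unfold pvMembersN
  refine congrArg (List.map fun i : Nat => (i : Int)) ?_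
  apply List.filter_congr
  intro i _
  simp [Function.comp, PySem.List.pyGetD_natCast, pvCfg]

lemma pvInnerIff (edges : List (Int × Int)) (config : List Int) (g : Int)
    (adj : PySem.Set (Int × Int)) (hadj : ∀ x, x ∈ adj ↔ x ∈ pvAdjL edges) :
    (((List.range ((pvMembersN config g).map (fun i : Nat => (i : Int))).length).all (fun i =>
      (List.range' (i + 1) (((pvMembersN config g).map (fun i : Nat => (i : Int))).length - (i + 1))).all
        (fun j =>
          PySem.Set.contains adj
            (min (((pvMembersN config g).map (fun i : Nat => (i : Int))).getD i 0)
                 (((pvMembersN config g).map (fun i : Nat => (i : Int))).getD j 0),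
             max (((pvMembersN config g).map (fun i : Nat => (i : Int))).getD i 0)
                 (((pvMembersN config g).map (fun i : Nat => (i : Int))).getD j 0))))) = true) ↔
    (∀ a b : Nat, a < b → b < config.length → pvCfg config a = g → pvCfg config b = g →
      ((a : Int), (b : Int)) ∈ pvAdjL edges) := by
  have hpw := pvMembersPairwise config g
  have hpg := List.pairwise_iff_getElem.mp hpw
  rw [List.all_eq_true]
  constructor
  · intro hall a b hab hb ha2 hb2
    have hma : a ∈ pvMembersN config g := (pvMembersNMem config g a).mpr ⟨lt_trans hab hb, ha2⟩
    have hmb : b ∈ pvMembersN config g := (pvMembersNMem config g b).mpr ⟨hb, hb2⟩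
    obtain ⟨ia, hia, hga⟩ := List.getElem_of_mem hma
    obtain ⟨ib, hib, hgb⟩ := List.getElem_of_mem hmb
    have hialtib : ia < ib := by
      rcases Nat.lt_trichotomy ia ib with h | h | h
      · exact h
      · subst h; rw [hga] at hgb; omega
      · have := hpg ib ia hib hia h; rw [hga, hgb] at this; omega
    have h1 := hall ia (by simp only [List.mem_range, List.length_map]; omega)
    rw [List.all_eq_true] at h1
    have h2 := h1 ib (by rw [List.mem_range'_1]; simp only [List.length_map]; omega)
    have e1 : ((pvMembersN config g).map (fun i : Nat => (i : Int))).getD ia 0 = ((a : Nat) : Int) := by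
      rw [List.getD_eq_getElem _ _ (by simpa using hia), List.getElem_map, hga]
    have e2 : ((pvMembersN config g).map (fun i : Nat => (i : Int))).getD ib 0 = ((b : Nat) : Int) := by
      rw [List.getD_eq_getElem _ _ (by simpa using hib), List.getElem_map, hgb]
    rw [e1, e2, min_eq_left (by exact_mod_cast le_of_lt hab),
      max_eq_right (by exact_mod_cast le_of_lt hab), pvContainsIff, hadj] at h2
    exact h2
  · intro hg i hi
    rw [List.all_eq_true]
    intro j hj
    rw [List.mem_range, List.length_map] at hi
    rw [List.mem_range'_1] at hj
    simp only [List.length_map] at hj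
    have hij : i < j := by omega
    have hjlen : j < (pvMembersN config g).length := by omega
    have e1 : ((pvMembersN config g).map (fun i : Nat => (i : Int))).getD i 0
        = (((pvMembersN config g)[i]'hi : Nat) : Int) := by
      rw [List.getD_eq_getElem _ _ (by simpa using hi), List.getElem_map]
    have e2 : ((pvMembersN config g).map (fun i : Nat => (i : Int))).getD j 0
        = (((pvMembersN config g)[j]'hjlen : Nat) : Int) := by
      rw [List.getD_eq_getElem _ _ (by simpa using hjlen), List.getElem_map]
    have hlt : (pvMembersN config g)[i] < (pvMembersN config g)[j] := hpg i j hi hjlen hij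
    have h1 := (pvMembersNMem config g _).mp (List.getElem_mem hi)
    have h2 := (pvMembersNMem config g _).mp (List.getElem_mem hjlen)
    rw [e1, e2, min_eq_left (by exact_mod_cast le_of_lt hlt),
      max_eq_right (by exact_mod_cast le_of_lt hlt), pvContainsIff, hadj]
    exact hg _ _ hlt h2.1 h1.2 h2.2

lemma pvAIff (edges : List (Int × Int)) (num_cliques : Int) (config : List Int)
    (hcol : ∀ c ∈ config, 0 ≤ c ∧ c < num_cliques) :
    is_feasible_target (config.length : Int) edges num_cliques config = true ↔
      pvGood edges config := by
  have hany := pvAnyFalse num_cliques config hcol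
  have h1' : ¬((config.length : Int) ≠ (config.length : Int)) := by simp
  have h2' : ¬(config.any (fun c => decide (c < 0) || decide (num_cliques ≤ c)) = true) := by
    simp [hany]
  have hadj : edges.foldl (fun s e => PySem.Set.add s (min e.1 e.2, max e.1 e.2))
      PySem.Set.empty = PySem.Set.ofList (pvAdjL edges) := by
    rw [PySem.Set.ofList_eq_foldl]
    unfold pvAdjL
    rw [List.foldl_map]
    rfl
  simp only [is_feasible_target, if_neg h1', if_neg h2', hadj, pvMembersEq]
  rw [List.all_eq_true]
  constructor
  · intro hall a b hab hb hcfg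
    obtain ⟨h0, hk⟩ := hcol _ (pvCfgMem config a (lt_trans hab hb))
    have hg : pvCfg config a ∈ PySem.List.pyRange 0 num_cliques 1 :=
      PySem.List.mem_pyRange_one.mpr ⟨h0, hk⟩
    have h1 := hall _ hg
    exact (pvInnerIff edges config (pvCfg config a) _
      (fun x => PySem.Set.mem_ofList _ x)).mp h1 a b hab hb rfl hcfg.symm
  · intro hgood g _
    exact (pvInnerIff edges config g _ (fun x => PySem.Set.mem_ofList _ x)).mpr
      (fun a b hab hb ha2 hb2 => hgood a b hab hb (by rw [ha2, hb2]))

lemma pvBIff (edges : List (Int × Int)) (num_cliques : Int) (config : List Int)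
    (hcol : ∀ c ∈ config, 0 ≤ c ∧ c < num_cliques) :
    is_feasible_target_alt (config.length : Int) edges num_cliques config = true ↔
      pvGood edges config := by
  have hany := pvAnyFalse num_cliques config hcol
  have h1' : ¬((config.length : Int) ≠ (config.length : Int)) := by simp
  have h2' : ¬(config.any (fun c => decide (c < 0) || decide (num_cliques ≤ c)) = true) := by
    simp [hany]
  simp only [is_feasible_target_alt, if_neg h1', if_neg h2']
  rw [pvFoldIntra, show PySem.Set.empty = ([] : List (Int × Int)) from rfl,
    ← PySem.Set.ofList_eq_foldl, PySem.Dict.foldl_insert_getD_add_one_eq_counter]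
  have hval : (PySem.Dict.counter config).values
      = (PySem.Set.ofList config).map (fun k => ((List.count k config : Nat) : Int)) := by
    simp [PySem.Dict.values, PySem.Dict.items_counter, List.map_map, Function.comp]
  have hlen : PySem.Set.len (PySem.Set.ofList (pvGoodL (config.length : Int) edges config))
      = (((pvGoodL (config.length : Int) edges config).toFinset.card : Nat) : Int) := by
    simp [PySem.Set.len, pvLenOfList]
  rw [PySem.List.foldl_add, zero_add, hval, List.map_map]
  have hfun : ((fun s => PySem.Int.floordiv (s * (s - 1)) 2)
        ∘ (fun k => ((List.count k config : Nat) : Int)))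
      = fun k => (((List.count k config).choose 2 : Nat) : Int) := by
    funext k
    simp only [Function.comp]
    exact pvFloordivChoose _
  rw [hfun]
  have hsum : ((PySem.Set.ofList config).map
        (fun k => (((List.count k config).choose 2 : Nat) : Int))).sum
      = (((pvP config).card : Nat) : Int) := by
    rw [show (fun k => (((List.count k config).choose 2 : Nat) : Int))
        = (Nat.cast ∘ (fun k => (List.count k config).choose 2)) from rfl,
      ← List.map_map, ← Nat.cast_list_sum,
      ← List.sum_toFinset _ (PySem.Set.nodup_ofList config), pvToFinsetOfList, ← pvCardP]
  rw [hlen, hsum, decide_eq_true_iff, Nat.cast_inj]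
  exact pvCardIffGood edges config

-- ===== VERDICT (by name: the statement is the Claim_ definition above) =====
theorem is_feasible_target_spec : Claim_equal_is_feasible_target := by
  intro num_vertices edges num_cliques config _
  unfold Spec_is_feasible_target
  by_cases h1 : (config.length : Int) ≠ num_vertices
  · simp only [is_feasible_target, is_feasible_target_alt, if_pos h1]
  · push_neg at h1
    subst h1
    by_cases h2 : config.any (fun c => decide (c < 0) || decide (num_cliques ≤ c)) = true
    · simp only [is_feasible_target, is_feasible_target_alt, ne_eq, not_true_eq_false,
        if_pos h2, ite_self]
    · have hcol : ∀ c ∈ config, 0 ≤ c ∧ c < num_cliques := by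
        intro c hc
        have := (List.any_eq_false).mp (Bool.not_eq_true _ |>.mp h2) c hc
        simp at this
        omega
      have hA := pvAIff edges num_cliques config hcol
      have hB := pvBIff edges num_cliques config hcol
      rw [← hB] at hA
      exact Bool.eq_iff_iff.mpr hA
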